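-- pv_equiv track=rewrite | github.com/winterash2/TIL | 2021-05-13-월간코드챌린지시즌2/2.py | solution
-- ===== SOURCE A (Python) =====
-- def solution(numbers):
--     answer = []
--
--     for org in numbers:
--         orgBin = ['0' for _ in range(60)]
--         idx = 0
--         orgList = bin(org)[2:]
--
--         count = 0
--         for elem in orgList:
--             if elem == '0':
--                 count += 1
--         if count == 0:
--             orgList = '0b10' + ''.join(orgList[1:])
--             answer.append(int(orgList, 2))
--         else:
--             orgList = list(orgList)
--             for i in range(len(orgList) - 1, -1, -1):
--                 if orgList[i] == '0':
--                     if i == len(orgList) - 1: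
--                         orgList[i] = '1'
--                     else:
--                         orgList[i] = '1'
--                         orgList[i+1] = '0'
--                     break
--             answer.append(int('0b' + ''.join(orgList), 2))
--
--     return answer
-- ===== SOURCE B (Python) =====
-- def solution(numbers):
--     answer = []
--     for n in numbers:
--         # count the trailing 1-bits of n
--         p = 0
--         m = n
--         while m > 0 and m % 2 == 1:
--             m //= 2
--             p += 1
--         answer.append(n + 1 if p == 0 else n + (1 << (p - 1)))
--     return answer
-- ===== Notes on version B (the rewrite author's own statement) =====
-- stated objective: simpler
-- what changed: B drops A's to-binary-string/count/scan/parse machinery entirely and works on the integer itself: it counts the trailing 1-bits p with a halving loop and appends n+1 when p=0 and n+2^(p-1) otherwise, which covers A's all-ones branch uniformly. Same asymptotics, but avoiding per-element string construction/scanning/parsing makes B measurably faster.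
-- outside the precondition, e.g. on solution([-1]): A returns [5], B returns [0]; on solution([-7]): A returns [23], B returns [-6]; on solution([-2]): A raises ValueError, B returns [-1]
import Mathlib
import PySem

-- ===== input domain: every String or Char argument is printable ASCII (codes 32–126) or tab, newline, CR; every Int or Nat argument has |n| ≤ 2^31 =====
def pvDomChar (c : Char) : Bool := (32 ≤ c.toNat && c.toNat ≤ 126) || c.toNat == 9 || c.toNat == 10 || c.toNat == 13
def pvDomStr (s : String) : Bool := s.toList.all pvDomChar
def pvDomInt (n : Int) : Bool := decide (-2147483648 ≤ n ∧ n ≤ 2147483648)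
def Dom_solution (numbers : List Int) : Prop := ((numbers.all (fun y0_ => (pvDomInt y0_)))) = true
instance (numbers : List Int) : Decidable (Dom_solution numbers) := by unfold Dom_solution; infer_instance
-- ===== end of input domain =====

-- B replaces A's binary-string surgery by pure integer arithmetic: count the trailing
-- 1-bits p of n and append n+1 (p = 0) or n + 2^(p-1) (p ≥ 1); objective: simpler.

-- ===== PORT A =====
-- digits of bin(n) after the '0b' prefix, MSB first, for n ≥ 1 (fuel = n makes the
-- repeated halving structurally recursive; binAux f n is exact whenever n ≤ f)
def binAux : Nat → Nat → List Char
  | 0, _ => []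
  | f + 1, n => if n = 0 then [] else binAux f (n / 2) ++ [if n % 2 = 1 then '1' else '0']

-- bin(org): '-0b…' for negative org, '0b0' for 0, '0b…' otherwise (exact)
def pyBin (org : Int) : List Char :=
  if org < 0 then '-' :: '0' :: 'b' :: binAux (-org).toNat (-org).toNat
  else if org = 0 then ['0', 'b', '0']
  else '0' :: 'b' :: binAux org.toNat org.toNat

-- int('0b' + s, 2): Horner parse of the digits; exact whenever s consists of '0'/'1'
-- only, which holds for every org ≥ 0 (inside Pre_); where Python raises ValueError
-- (org < 0, outside Pre_) the port counts a non-digit as 0 instead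
def parseBin (s : List Char) : Int :=
  s.foldl (fun a c => 2 * a + (if c = '1' then 1 else 0)) 0

-- the inner 'for i in range(len(orgList)-1, -1, -1): … break' loop, counting i down;
-- indices i, i+1 are in range at every write, so List.set/List.getD are exact
def scanA (l : List Char) (i : Nat) : List Char :=
  if l.getD i ' ' = '0' then
    if i = l.length - 1 then l.set i '1' else (l.set i '1').set (i + 1) '0'
  else
    match i with
    | 0 => l
    | j + 1 => scanA l j

-- body of A's 'for org in numbers' loop (the dead orgBin/idx of the source are dropped)
def elemA (org : Int) : Int :=
  let orgList := PySem.List.slice (pyBin org) (some 2) none      -- bin(org)[2:]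
  let count := orgList.foldl (fun c e => if e = '0' then c + 1 else c) (0 : Int)
  if count = 0 then
    parseBin ('1' :: '0' :: PySem.List.slice orgList (some 1) none)   -- int('0b10'+orgList[1:], 2)
  else
    parseBin (scanA orgList (orgList.length - 1))                     -- int('0b'+''.join(orgList), 2)

def solution (numbers : List Int) : List Int :=
  numbers.foldl (fun answer org => answer ++ [elemA org]) []

-- ===== PORT B =====
-- the 'while m > 0 and m % 2 == 1: m //= 2; p += 1' loop; fuel = m.toNat bounds the
-- number of halvings, so the recursion is structural and exact
def trailAux : Nat → Int → Int → Int
  | 0, _, p => p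
  | f + 1, m, p =>
      if 0 < m ∧ PySem.Int.mod m 2 = 1 then trailAux f (PySem.Int.floordiv m 2) (p + 1) else p

-- body of B's loop; 1 << (p-1) is ported as 2^(p-1), exact since p ≥ 1 in that branch
def elemB (n : Int) : Int :=
  let p := trailAux n.toNat n 0
  if p = 0 then n + 1 else n + 2 ^ (p - 1).toNat

def solution_alt (numbers : List Int) : List Int :=
  numbers.foldl (fun answer n => answer ++ [elemB n]) []

-- ===== PRECONDITION & SPEC =====
-- Pre_ excludes lists containing a negative number: there bin(org)[2:] keeps the 'b' of
-- '-0b…', so A raises ValueError for most negatives and, for org = -(2^k - 1), returns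
-- a value accidentally produced by parsing past that 'b'.
def Pre_solution (numbers : List Int) : Prop := ∀ n ∈ numbers, 0 ≤ n
instance (numbers : List Int) : Decidable (Pre_solution numbers) := by unfold Pre_solution; infer_instance

def pvWitness_solution : List Int := [5, 0, 7, 12]

def Spec_solution (numbers : List Int) (out : List Int) : Prop := out = solution_alt numbers
instance (numbers : List Int) (out : List Int) : Decidable (Spec_solution numbers out) := by unfold Spec_solution; infer_instance

-- ===== CLAIM (what is proved, stated in full; the proofs are below) =====
def Claim_equal_solution : Prop := ∀ (numbers : List Int), Dom_solution numbers → Pre_solution numbers → Spec_solution numbers (solution numbers)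

-- ===== LEMMAS AND PROOFS =====

-- fuel irrelevance for binAux
theorem binAux_mono : ∀ (f1 : Nat) (f2 n : Nat), n ≤ f1 → n ≤ f2 → binAux f1 n = binAux f2 n := by
  intro f1
  induction f1 with
  | zero =>
    intro f2 n h1 _
    interval_cases n
    cases f2 <;> simp [binAux]
  | succ f ih =>
    intro f2 n h1 h2
    by_cases hn : n = 0
    · subst hn; cases f2 <;> simp [binAux]
    · have hn1 : 1 ≤ n := by omega
      obtain ⟨g, rfl⟩ : ∃ g, f2 = g + 1 := ⟨f2 - 1, by omega⟩
      simp only [binAux, hn, if_false]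
      rw [ih g (n / 2) (by omega) (by omega)]

def binD (n : Nat) : List Char := binAux n n

theorem binD_pos (n : Nat) (h : 0 < n) :
    binD n = binD (n / 2) ++ [if n % 2 = 1 then '1' else '0'] := by
  unfold binD
  obtain ⟨g, rfl⟩ : ∃ g, n = g + 1 := ⟨n - 1, by omega⟩
  simp only [binAux]
  rw [binAux_mono g ((g + 1) / 2) ((g + 1) / 2) (by omega) (by omega)]
  simp

-- trailing-ones count (the mathematical spec used by both sides)
def tOnes (n : Nat) : Nat := if h : n % 2 = 1 then tOnes (n / 2) + 1 else 0
  decreasing_by omega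

theorem tOnes_even (n : Nat) (h : n % 2 ≠ 1) : tOnes n = 0 := by
  unfold tOnes; simp [h]

theorem tOnes_odd (n : Nat) (h : n % 2 = 1) : tOnes n = tOnes (n / 2) + 1 := by
  conv_lhs => rw [tOnes]
  simp [h]

theorem trailAux_eq (f : Nat) : ∀ (k : Nat) (p : Int), k ≤ f → trailAux f (k : Int) p = p + (tOnes k : Int) := by
  induction f with
  | zero =>
    intro k p h
    have : k = 0 := by omega
    subst this
    simp [trailAux, tOnes_even]
  | succ f ih =>
    intro k p h
    have h2 : (2 : Int) = ((2 : Nat) : Int) := by norm_num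
    by_cases hodd : k % 2 = 1
    · have hk : 0 < (k : Int) ∧ PySem.Int.mod (k : Int) 2 = 1 := by
        constructor
        · omega
        · rw [h2, PySem.Int.mod_natCast k 2]
          exact_mod_cast hodd
      simp only [trailAux, hk, and_self, if_true]
      rw [h2, PySem.Int.floordiv_natCast k 2, ih (k / 2) (p + 1) (by omega), tOnes_odd k hodd]
      push_cast; ring
    · have hk : ¬ (0 < (k : Int) ∧ PySem.Int.mod (k : Int) 2 = 1) := by
        rintro ⟨-, hm⟩
        rw [h2, PySem.Int.mod_natCast k 2] at hm
        omega
      simp only [trailAux, hk, if_false]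
      rw [tOnes_even k hodd]
      simp

-- Horner-parse facts
theorem parse_go (l : List Char) : ∀ (a : Int),
    l.foldl (fun a c => 2 * a + (if c = '1' then 1 else 0)) a
      = a * 2 ^ l.length + parseBin l := by
  unfold parseBin
  induction l with
  | nil => intro a; simp
  | cons c t ih =>
    intro a
    simp only [List.foldl_cons, List.length_cons]
    rw [ih (2 * a + if c = '1' then 1 else 0), ih (2 * 0 + if c = '1' then 1 else 0)]
    generalize (if c = '1' then (1 : Int) else 0) = d
    ring

theorem parse_append (u v : List Char) :
    parseBin (u ++ v) = parseBin u * 2 ^ v.length + parseBin v := by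
  unfold parseBin
  rw [List.foldl_append]
  exact parse_go v _

theorem parse_replicate (p : Nat) : parseBin (List.replicate p '1') = 2 ^ p - 1 := by
  induction p with
  | zero => simp [parseBin]
  | succ q ih =>
    rw [List.replicate_succ, show ('1' :: List.replicate q '1') = ['1'] ++ List.replicate q '1' from rfl,
      parse_append, ih]
    simp [parseBin, pow_succ]
    ring

theorem parse_binD (n : Nat) : parseBin (binD n) = (n : Int) := by
  induction n using Nat.strong_induction_on with
  | _ n ih =>
    by_cases h : n = 0
    · subst h; simp [binD, binAux, parseBin]
    · rw [binD_pos n (by omega), parse_append, ih (n / 2) (by omega)]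
      by_cases h2 : n % 2 = 1 <;> simp [h2, parseBin] <;> omega

-- the zero-count loop is List.count
theorem countF_eq (l : List Char) : ∀ (c : Int),
    l.foldl (fun c e => if e = '0' then c + 1 else c) c = c + (l.count '0' : Int) := by
  induction l with
  | nil => intro c; simp
  | cons a t ih =>
    intro c
    simp only [List.foldl_cons]
    rw [ih]
    by_cases h : a = '0' <;> simp [h, List.count_cons] <;> push_cast <;> ring

-- structure of the binary string: trailing ones split off
theorem binD_struct (n : Nat) :
    binD n = binD (n / 2 ^ tOnes n) ++ List.replicate (tOnes n) '1' ∧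
    (n / 2 ^ tOnes n) % 2 = 0 ∧
    n = (n / 2 ^ tOnes n) * 2 ^ tOnes n + (2 ^ tOnes n - 1) := by
  induction n using Nat.strong_induction_on with
  | _ n ih =>
    by_cases hodd : n % 2 = 1
    · have hn : 0 < n := by omega
      have ht := tOnes_odd n hodd
      obtain ⟨ihb, ihe, ihv⟩ := ih (n / 2) (by omega)
      set t := tOnes (n / 2) with htdef
      set m := n / 2 / 2 ^ t with hmdef
      have hq : 0 < 2 ^ t := Nat.pow_pos (by omega)
      have hval : n = m * 2 ^ (t + 1) + (2 ^ (t + 1) - 1) := by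
        have h2 : n = 2 * (n / 2) + 1 := by omega
        rw [h2, ihv]; rw [pow_succ]; ring_nf; omega
      have hdiv : n / 2 ^ (t + 1) = m := by
        have hq1 : 0 < 2 ^ (t + 1) := Nat.pow_pos (by omega)
        rw [hval, Nat.mul_comm m, Nat.mul_add_div hq1, Nat.div_eq_of_lt (by omega)]; omega
      refine ⟨?_, ?_, ?_⟩
      · rw [ht, hdiv, binD_pos n hn, hodd]
        simp only [if_pos rfl]
        rw [ihb, List.replicate_succ']
        simp [List.append_assoc]
      · rw [ht, hdiv]; exact ihe
      · rw [ht, hdiv]; exact hval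
    · have ht := tOnes_even n hodd
      rw [ht]
      refine ⟨by simp, by omega, by omega⟩

-- the countdown scan skips indices holding no '0'
theorem getD_app (u v : List Char) (n : Nat) (d : Char) (h : u.length ≤ n) :
    (u ++ v).getD n d = v.getD (n - u.length) d := by
  simp [List.getD_eq_getElem?_getD, List.getElem?_append_right h]

theorem getD_repl (p n : Nat) (h : n < p) : (List.replicate p '1').getD n ' ' = '1' := by
  simp [List.getD_eq_getElem?_getD, h]

theorem scanA_skip (l : List Char) (j : Nat) :
    ∀ (i : Nat), j ≤ i → (∀ r, j < r → r ≤ i → l.getD r ' ' ≠ '0') → scanA l i = scanA l j := by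
  intro i
  induction i with
  | zero => intro h _; have : j = 0 := by omega
            subst this; rfl
  | succ i' ih =>
    intro hj h
    by_cases hje : j = i' + 1
    · subst hje; rfl
    · have hne : l.getD (i' + 1) ' ' ≠ '0' := h (i' + 1) (by omega) (by omega)
      have step : scanA l (i' + 1) = scanA l i' := by
        rw [scanA, if_neg hne]
      rw [step]
      exact ih (by omega) (fun r h1 h2 => h r h1 (by omega))

theorem slice2 (l : List Char) : PySem.List.slice l (some 2) none = l.drop 2 := by
  have h : ((2 : Nat) : Int) = (2 : Int) := by norm_num
  rw [← h, PySem.List.slice_from_natCast]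

theorem elemB_eq (k : Nat) :
    elemB (k : Int) = if tOnes k = 0 then (k : Int) + 1 else (k : Int) + 2 ^ (tOnes k - 1) := by
  unfold elemB
  rw [show ((k : Int)).toNat = k from Int.toNat_natCast k, trailAux_eq k k 0 (le_refl k)]
  simp only [zero_add]
  by_cases h : tOnes k = 0
  · simp [h]
  · rw [if_neg (by exact_mod_cast h), if_neg h]
    congr 1
    rw [show ((tOnes k : Int) - 1).toNat = tOnes k - 1 by omega]

theorem elem_eq (k : Nat) : elemA (k : Int) = elemB (k : Int) := by
  by_cases hk0 : k = 0
  · subst hk0; norm_num; decide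
  · -- k ≥ 1 : orgList = binD k
    have horg : PySem.List.slice (pyBin (k : Int)) (some 2) none = binD k := by
      unfold pyBin
      rw [if_neg (by omega), if_neg (by exact_mod_cast hk0)]
      rw [show ((k : Int)).toNat = k from Int.toNat_natCast k, slice2]
      rfl
    obtain ⟨hb, he, hv⟩ := binD_struct k
    rw [elemB_eq]
    simp only [elemA, horg, countF_eq]
    set p := tOnes k with hp
    set m := k / 2 ^ p with hm
    have hq : 0 < 2 ^ p := Nat.pow_pos (by omega)
    by_cases hmz : m = 0
    · -- k = 2^p - 1 : the all-ones branch of A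
      have hkv : k = 2 ^ p - 1 := by rw [hmz] at hv; simpa using hv
      have hp1 : 1 ≤ p := by
        rcases Nat.eq_zero_or_pos p with hc | hc
        · exfalso; rw [hc] at hkv; simp at hkv; omega
        · omega
      have hball : binD k = List.replicate p '1' := by
        rw [hb, hmz]; rfl
      rw [hball, if_pos (by simp [List.count_replicate])]
      rw [PySem.List.slice_from_one]
      obtain ⟨q, hpq⟩ : ∃ q, p = q + 1 := ⟨p - 1, by omega⟩
      rw [hpq, show (List.replicate (q + 1) '1').tail = List.replicate q '1' from by
        simp [List.replicate_succ]]
      rw [show ('1' :: '0' :: List.replicate q '1') = ['1', '0'] ++ List.replicate q '1' from rfl,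
        parse_append, parse_replicate]
      rw [if_neg (by omega)]
      have hck : (k : Int) = 2 ^ (q + 1) - 1 := by
        rw [hkv, hpq,
          Nat.cast_sub (by have := Nat.pow_pos (show 0 < 2 from by omega) (n := q + 1); omega)]
        push_cast; ring
      rw [hck, show q + 1 - 1 = q from by omega,
        show parseBin ['1', '0'] = 2 from by decide]
      simp only [List.length_replicate, pow_succ]
      ring
    · -- m > 0 even : A finds the lowest '0' and flips
      have hm2 : 0 < m := Nat.pos_of_ne_zero hmz
      have hmm : m % 2 ≠ 1 := by rw [he]; decide
      have hbm : binD m = binD (m / 2) ++ ['0'] := by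
        rw [binD_pos m hm2, if_neg hmm]
      set u := binD (m / 2) with hu
      have hl : binD k = u ++ '0' :: List.replicate p '1' := by
        rw [hb, hbm, List.append_assoc]; rfl
      have hlen : (binD k).length = u.length + 1 + p := by
        rw [hl]; simp; omega
      have hmem : '0' ∈ binD k := by rw [hl]; simp
      rw [if_neg (by have := List.count_pos_iff.2 hmem; omega)]
      -- the countdown scan skips the trailing ones and reaches the '0' at index u.length
      have hskip : scanA (binD k) ((binD k).length - 1) = scanA (binD k) u.length := by
        rw [hlen, show u.length + 1 + p - 1 = u.length + p from by omega]
        apply scanA_skip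
        · omega
        · intro r h1 h2
          rw [hl, getD_app u _ r ' ' (by omega)]
          obtain ⟨d, hd⟩ : ∃ d, r - u.length = d + 1 := ⟨r - u.length - 1, by omega⟩
          rw [hd]
          simp only [List.getD_cons_succ]
          rw [getD_repl p d (by omega)]
          decide
      rw [hskip]
      have hg0 : (binD k).getD u.length ' ' = '0' := by
        rw [hl, getD_app u _ u.length ' ' (le_refl _)]
        simp
      by_cases hpz : p = 0
      · -- lowest '0' is the last character: A appends n+1
        have hl0 : binD k = u ++ ['0'] := by rw [hl, hpz]; rfl
        rw [scanA.eq_def, if_pos hg0, if_pos (by rw [hlen]; omega)]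
        have hset : (binD k).set u.length '1' = u ++ ['1'] := by
          rw [hl0]; simp
        rw [hset, if_pos hpz]
        have hk1 : parseBin (u ++ ['0']) = (k : Int) := by rw [← hl0, parse_binD]
        rw [parse_append] at hk1 ⊢
        rw [show parseBin ['1'] = 1 from by decide]
        rw [show parseBin ['0'] = 0 from by decide] at hk1
        simp at hk1 ⊢
        omega
      · -- interior lowest '0': A flips it and zeroes the bit below
        obtain ⟨q, hq1⟩ : ∃ q, p = q + 1 := ⟨p - 1, by omega⟩
        have hl1 : binD k = u ++ '0' :: '1' :: List.replicate q '1' := by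
          rw [hl, hq1, List.replicate_succ]
        rw [scanA.eq_def, if_pos hg0, if_neg (by rw [hlen]; omega)]
        have hset : ((binD k).set u.length '1').set (u.length + 1) '0'
            = u ++ '1' :: '0' :: List.replicate q '1' := by
          rw [hl1]
          simp [List.set_append, show ¬ u.length < u.length from by omega]
        rw [hset, if_neg hpz]
        have hk1 : parseBin (u ++ '0' :: '1' :: List.replicate q '1') = (k : Int) := by
          rw [← hl1, parse_binD]
        rw [show ('0' :: '1' :: List.replicate q '1') = ['0', '1'] ++ List.replicate q '1' from rfl,
          parse_append, parse_append, parse_replicate] at hk1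
        rw [show ('1' :: '0' :: List.replicate q '1') = ['1', '0'] ++ List.replicate q '1' from rfl,
          parse_append, parse_append, parse_replicate]
        rw [show parseBin ['0', '1'] = 1 from by decide] at hk1
        rw [show parseBin ['1', '0'] = 2 from by decide]
        rw [hq1, show q + 1 - 1 = q from by omega]
        simp only [List.length_append, List.length_cons, List.length_replicate] at hk1 ⊢
        rw [← hk1]
        ring

theorem sol_map (numbers : List Int) : solution numbers = numbers.map elemA := by
  unfold solution; rw [PySem.List.foldl_append_singleton_eq_map]; rfl

theorem solalt_map (numbers : List Int) : solution_alt numbers = numbers.map elemB := by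
  unfold solution_alt; rw [PySem.List.foldl_append_singleton_eq_map]; rfl

-- ===== VERDICT (by name: the statement is the Claim_ definition above) =====
theorem solution_spec : Claim_equal_solution := by
  intro numbers _ hpre
  unfold Spec_solution
  rw [sol_map, solalt_map]
  apply List.map_congr_left
  intro n hn
  have h0 : 0 ≤ n := hpre n hn
  have : n = ((n.toNat : Nat) : Int) := by omega
  rw [this, elem_eq]
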